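-- pv_equiv track=rewrite | github.com/ImeneGa/python_exercices | exercice_13.py | allDigits
-- ===== SOURCE A (Python) =====
-- def allDigits(a, b, c):
--     """
--     This function verifies if 3 integer of 3 digits each a, b and c contains all the digits from 1 to 9
--     """
--     i = 0
--     tab1 = []
--     j = 0
--     tab2 = []
--     k = 0
--     tab3 = []
--     for i in str(a):
--         tab1.append(i)
--     for j in str(b):
--         tab2.append(j)
--     for k in str(c):
--         tab3.append(k)
--     tab = tab1 + tab2 + tab3
--     tab.sort()
--     return tab == ['1', '2', '3', '4', '5', '6', '7', '8', '9']
-- ===== SOURCE B (Python) =====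
-- def allDigits(a, b, c):
--     cnt = {}
--     for ch in str(a) + str(b) + str(c):
--         cnt[ch] = cnt.get(ch, 0) + 1
--     return len(cnt) == 9 and all(cnt.get(d) == 1 for d in "123456789")
-- ===== Notes on version B (the rewrite author's own statement) =====
-- stated objective: simpler
-- what changed: Replaces A's three copy loops plus sort-and-compare against ['1'..'9'] with a single counting pass that tallies the characters of str(a)+str(b)+str(c) in a dict and checks the tally is exactly {each of '1'..'9' once, nothing else}.
import Mathlib
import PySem

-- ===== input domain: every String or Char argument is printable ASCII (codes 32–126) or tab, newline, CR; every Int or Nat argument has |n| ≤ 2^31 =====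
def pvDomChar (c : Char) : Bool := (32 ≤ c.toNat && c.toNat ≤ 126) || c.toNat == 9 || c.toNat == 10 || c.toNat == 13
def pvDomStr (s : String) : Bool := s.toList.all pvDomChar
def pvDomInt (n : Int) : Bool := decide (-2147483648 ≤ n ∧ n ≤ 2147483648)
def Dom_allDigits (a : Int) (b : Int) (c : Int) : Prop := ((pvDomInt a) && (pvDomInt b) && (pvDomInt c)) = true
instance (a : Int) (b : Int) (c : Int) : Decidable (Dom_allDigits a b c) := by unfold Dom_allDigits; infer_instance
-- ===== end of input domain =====

-- B replaces A's sort-and-compare with a single counting pass over the digits (simpler: no sort, one tally plus an exact-match check).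

-- ===== PORT A =====
-- copy chars of str(a), str(b), str(c) into three lists, concatenate, sort, compare
def allDigits (a : Int) (b : Int) (c : Int) : Bool :=
  let tab1 := (PySem.Int.toStr a).toList.foldl (fun acc i => acc ++ [i]) []
  let tab2 := (PySem.Int.toStr b).toList.foldl (fun acc j => acc ++ [j]) []
  let tab3 := (PySem.Int.toStr c).toList.foldl (fun acc k => acc ++ [k]) []
  let tab := tab1 ++ tab2 ++ tab3
  let tab := PySem.List.sorted tab (fun x => x)
  decide (tab = ['1', '2', '3', '4', '5', '6', '7', '8', '9'])

-- ===== PORT B =====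
-- tally the characters of str(a)+str(b)+str(c) in a dict, then check the tally is exactly {d ↦ 1 | d ∈ "123456789"}
def allDigits_alt (a : Int) (b : Int) (c : Int) : Bool :=
  let s := (PySem.Int.toStr a).toList ++ (PySem.Int.toStr b).toList ++ (PySem.Int.toStr c).toList
  let cnt := s.foldl (fun d ch => d.insert ch (d.getD ch 0 + (1 : Int))) PySem.Dict.empty
  decide (cnt.size = 9) &&
    (['1', '2', '3', '4', '5', '6', '7', '8', '9'].all (fun d => cnt.get? d == some 1))

-- ===== PRECONDITION & SPEC =====
def Spec_allDigits (a : Int) (b : Int) (c : Int) (out : Bool) : Prop := out = allDigits_alt a b c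
instance (a : Int) (b : Int) (c : Int) (out : Bool) : Decidable (Spec_allDigits a b c out) := by unfold Spec_allDigits; infer_instance

-- ===== CLAIM (what is proved, stated in full; the proofs are below) =====
def Claim_equal_allDigits : Prop := ∀ (a : Int) (b : Int) (c : Int), Dom_allDigits a b c → Spec_allDigits a b c (allDigits a b c)

-- ===== LEMMAS AND PROOFS =====

-- copying a list element by element is the list itself
theorem pv_foldl_copy (l : List Char) :
    l.foldl (fun acc x => acc ++ [x]) [] = l := by
  have h := PySem.List.foldl_append_singleton_eq_map (f := fun x : Char => x) l []
  simpa using h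

-- the counter's size is the number of distinct characters = s.toFinset.card
theorem pv_counter_size (s : List Char) :
    (PySem.Dict.counter s).size = s.toFinset.card := by
  have hk : (PySem.Dict.counter s).keys = PySem.Set.ofList s := PySem.Dict.keys_counter s
  have hlen : (PySem.Dict.counter s).size = (PySem.Set.ofList s).length := by
    have : (PySem.Dict.counter s).keys.length = (PySem.Dict.counter s).size := by
      simp [PySem.Dict.keys, PySem.Dict.size]
    rw [← this, hk]
  rw [hlen]
  have hperm : (PySem.Set.ofList s).Perm s.dedup := by
    refine (List.perm_ext_iff_of_nodup (PySem.Set.nodup_ofList s) (List.nodup_dedup s)).mpr ?_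
    intro x
    rw [PySem.Set.mem_ofList, List.mem_dedup]
  rw [hperm.length_eq, List.card_toFinset]

-- the counter maps d to 1 exactly when d occurs once in s
theorem pv_counter_get_one (s : List Char) (d : Char) :
    (PySem.Dict.counter s).get? d = some 1 ↔ s.count d = 1 := by
  have hD : (PySem.Dict.counter s).getD d 0 = (s.count d : Int) := PySem.Dict.getD_counter s d
  constructor
  · intro h
    have : (PySem.Dict.counter s).getD d 0 = 1 := by simp [PySem.Dict.getD, h]
    rw [hD] at this
    exact_mod_cast this
  · intro h
    have hc : (PySem.Dict.counter s).contains d = true := by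
      rw [PySem.Dict.contains_counter]
      simp only [List.contains_iff_mem]
      exact List.count_pos_iff.mp (by omega)
    rw [PySem.Dict.contains_eq_isSome_get?] at hc
    obtain ⟨v, hv⟩ := Option.isSome_iff_exists.mp hc
    have : (PySem.Dict.counter s).getD d 0 = v := by simp [PySem.Dict.getD, hv]
    rw [hD, h] at this
    rw [hv]
    exact congrArg some (by exact_mod_cast this.symm)

def pvTarget : List Char := ['1', '2', '3', '4', '5', '6', '7', '8', '9']

-- each digit occurs exactly once in the target
theorem pv_target_count : ∀ d ∈ pvTarget, pvTarget.count d = 1 := by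
  intro d hd
  fin_cases hd <;> simp [pvTarget]

-- central equivalence: sorted s = "123456789" iff the tally has exactly nine keys, each digit counted once
theorem pv_key (s : List Char) :
    (PySem.List.sorted s (fun x => x) = pvTarget) ↔
    ((PySem.Dict.counter s).size = 9 ∧ ∀ d ∈ pvTarget, (PySem.Dict.counter s).get? d = some 1) := by
  constructor
  · intro h
    have hperm : pvTarget.Perm s := h ▸ (PySem.List.sorted_perm s (fun x => x) false)
    constructor
    · rw [pv_counter_size]
      have hfs : s.toFinset = pvTarget.toFinset := by
        ext x; simp only [List.mem_toFinset]; exact (hperm.mem_iff).symm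
      rw [hfs]; simp [pvTarget]
    · intro d hd
      rw [pv_counter_get_one]
      rw [← hperm.count_eq]
      exact pv_target_count d hd
  · rintro ⟨hsize, hones⟩
    have hcount : ∀ d ∈ pvTarget, s.count d = 1 := fun d hd => (pv_counter_get_one s d).mp (hones d hd)
    have hsub : pvTarget.toFinset ⊆ s.toFinset := by
      intro x hx
      rw [List.mem_toFinset] at *
      exact List.count_pos_iff.mp (by have := hcount x hx; omega)
    have hcards : s.toFinset.card ≤ pvTarget.toFinset.card := by
      rw [← pv_counter_size, hsize]; simp [pvTarget]
    have hfs : pvTarget.toFinset = s.toFinset := Finset.eq_of_subset_of_card_le hsub hcards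
    have hperm : pvTarget.Perm s := by
      rw [List.perm_iff_count]
      intro x
      by_cases hx : x ∈ pvTarget
      · rw [hcount x hx]
        exact pv_target_count x hx
      · have hxs : x ∉ s := by
          intro hmem
          apply hx
          have hmt : x ∈ s.toFinset := List.mem_toFinset.mpr hmem
          rw [← hfs] at hmt
          exact List.mem_toFinset.mp hmt
        rw [List.count_eq_zero.mpr hxs, List.count_eq_zero.mpr hx]
    exact PySem.List.sorted_eq_of_perm_of_pairwise_lt s pvTarget (fun x => x) hperm (by simp [pvTarget, List.pairwise_cons])

-- ===== VERDICT (by name: the statement is the Claim_ definition above) =====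
theorem allDigits_spec : Claim_equal_allDigits := by
  intro a b c _
  unfold Spec_allDigits allDigits allDigits_alt
  simp only [pv_foldl_copy, PySem.Dict.foldl_insert_getD_add_one_eq_counter]
  set s := (PySem.Int.toStr a).toList ++ (PySem.Int.toStr b).toList ++ (PySem.Int.toStr c).toList
  rw [Bool.eq_iff_iff]
  simp only [decide_eq_true_eq, Bool.and_eq_true, List.all_eq_true, beq_iff_eq]
  exact (pv_key s).trans (by constructor <;> (rintro ⟨h1, h2⟩; exact ⟨h1, fun d hd => h2 d hd⟩))
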